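-- pv_equiv track=rewrite | github.com/MichaelCarpenzano/WordSenseIdentifier | generator/languagegenerator.py | extract_bigram
-- ===== SOURCE A (Python) =====
-- def extract_bigram(contexts, mostCommonWords):
--     bigramCounts = {"<OOV>": {"<OOV>": 0}}
--     OOV = "<OOV>"
--
--     for context in contexts:
--         sequences = [context[i:i + 2] for i in range(len(context) - 2 + 1)]
--
--         for bigram in sequences:
--                 try:
--                     bigramCounts[bigram[0] if bigram[0] in mostCommonWords else OOV][bigram[1] if bigram[1] in mostCommonWords else OOV] += 1
--                 except KeyError:
--                     try:
--                         bigramCounts[bigram[0] if bigram[0] in mostCommonWords else OOV][bigram[1] if bigram[1] in mostCommonWords else OOV] = 1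
--                     except KeyError:
--                         bigramCounts[bigram[0] if bigram[0] in mostCommonWords else OOV] = {bigram[1] if bigram[1] in mostCommonWords else OOV: 1}
--
--     return bigramCounts
-- ===== SOURCE B (Python) =====
-- def extract_bigram(contexts, mostCommonWords):
--     OOV = "<OOV>"
--     # phase 1: flat bigram counts over OOV-mapped tokens
--     counts = {}
--     for context in contexts:
--         mapped = [t if t in mostCommonWords else OOV for t in context]
--         for pair in zip(mapped, mapped[1:]):
--             counts[pair] = counts.get(pair, 0) + 1
--     # phase 2: reshape the flat counter into the nested dict
--     bigramCounts = {OOV: {OOV: 0}}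
--     for (a, b), n in counts.items():
--         inner = bigramCounts.setdefault(a, {})
--         inner[b] = inner.get(b, 0) + n
--     return bigramCounts
-- ===== Notes on version B (the rewrite author's own statement) =====
-- stated objective: alternative
-- what changed: A builds the nested dict incrementally with a three-level try/except per bigram; B first accumulates a flat counter keyed by OOV-mapped (first, second) pairs across all contexts and then reshapes that counter into the seeded nested dict in a second pass.
import Mathlib
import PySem

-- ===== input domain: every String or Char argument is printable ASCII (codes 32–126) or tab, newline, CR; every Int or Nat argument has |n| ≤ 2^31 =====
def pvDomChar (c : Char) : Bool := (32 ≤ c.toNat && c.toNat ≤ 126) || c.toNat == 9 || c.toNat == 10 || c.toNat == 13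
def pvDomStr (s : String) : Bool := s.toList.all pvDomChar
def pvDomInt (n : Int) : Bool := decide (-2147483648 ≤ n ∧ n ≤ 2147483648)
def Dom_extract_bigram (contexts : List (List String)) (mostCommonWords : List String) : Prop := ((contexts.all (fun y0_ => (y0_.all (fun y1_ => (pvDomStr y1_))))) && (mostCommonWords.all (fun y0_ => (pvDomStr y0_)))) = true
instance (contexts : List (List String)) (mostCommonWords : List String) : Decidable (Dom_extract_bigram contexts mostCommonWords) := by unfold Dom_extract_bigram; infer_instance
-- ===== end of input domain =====

-- B replaces A's incremental nested try/except updates by a flat count-then-reshape pass (alternative decomposition, same cost).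

-- ===== PORT A =====
-- one bigram step of A: the try/except chain, as the match on the two lookups
def pvStepA (mostCommonWords : List String) (bc : PySem.Dict String (PySem.Dict String Int))
    (bigram : List String) : PySem.Dict String (PySem.Dict String Int) :=
  -- bigram[0] / bigram[1]: every slice A forms has length 2, so the defaults are never used
  let a := if (PySem.List.pyGetD bigram 0 "") ∈ mostCommonWords then PySem.List.pyGetD bigram 0 "" else "<OOV>"
  let b := if (PySem.List.pyGetD bigram 1 "") ∈ mostCommonWords then PySem.List.pyGetD bigram 1 "" else "<OOV>"
  match bc.get? a with
  | some inner =>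
      match inner.get? b with
      | some v => bc.insert a (inner.insert b (v + 1))   -- += 1 succeeds
      | none   => bc.insert a (inner.insert b 1)          -- first except: inner assignment succeeds
  | none => bc.insert a (PySem.Dict.empty.insert b 1)     -- second except: fresh inner dict

def extract_bigram (contexts : List (List String)) (mostCommonWords : List String) :
    List (String × List (String × Int)) :=
  let init : PySem.Dict String (PySem.Dict String Int) :=
    PySem.Dict.empty.insert "<OOV>" (PySem.Dict.empty.insert "<OOV>" 0)
  let bigramCounts := contexts.foldl (fun bc context =>
    let sequences := (PySem.List.pyRange 0 (PySem.List.len context - 2 + 1) 1).map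
      (fun i => PySem.List.slice context (some i) (some (i + 2)))
    sequences.foldl (pvStepA mostCommonWords) bc) init
  bigramCounts.items.map (fun p => (p.1, p.2.items))

-- ===== PORT B =====
def pvMapTok (mostCommonWords : List String) (t : String) : String :=
  if t ∈ mostCommonWords then t else "<OOV>"

-- counts[pair] = counts.get(pair, 0) + 1
def pvCountStep (c : PySem.Dict (String × String) Int) (p : String × String) :
    PySem.Dict (String × String) Int :=
  c.insert p (c.getD p 0 + 1)

-- inner = bigramCounts.setdefault(a, {}); inner[b] = inner.get(b, 0) + n
def pvReshapeStep (bc : PySem.Dict String (PySem.Dict String Int))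
    (item : (String × String) × Int) : PySem.Dict String (PySem.Dict String Int) :=
  let inner := bc.getD item.1.1 PySem.Dict.empty
  bc.insert item.1.1 (inner.insert item.1.2 (inner.getD item.1.2 0 + item.2))

def extract_bigram_alt (contexts : List (List String)) (mostCommonWords : List String) :
    List (String × List (String × Int)) :=
  let counts := contexts.foldl (fun c context =>
    let mapped := context.map (pvMapTok mostCommonWords)
    (mapped.zip (PySem.List.slice mapped (some 1) none)).foldl pvCountStep c) PySem.Dict.empty
  let seed : PySem.Dict String (PySem.Dict String Int) :=
    PySem.Dict.empty.insert "<OOV>" (PySem.Dict.empty.insert "<OOV>" 0)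
  (counts.items.foldl pvReshapeStep seed).items.map (fun p => (p.1, p.2.items))

-- ===== PRECONDITION & SPEC =====
def Spec_extract_bigram (contexts : List (List String)) (mostCommonWords : List String) (out : List (String × List (String × Int))) : Prop := out = extract_bigram_alt contexts mostCommonWords
instance (contexts : List (List String)) (mostCommonWords : List String) (out : List (String × List (String × Int))) : Decidable (Spec_extract_bigram contexts mostCommonWords out) := by unfold Spec_extract_bigram; infer_instance

-- ===== CLAIM (what is proved, stated in full; the proofs are below) =====
def Claim_equal_extract_bigram : Prop := ∀ (contexts : List (List String)) (mostCommonWords : List String), Dom_extract_bigram contexts mostCommonWords → Spec_extract_bigram contexts mostCommonWords (extract_bigram contexts mostCommonWords)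

-- ===== LEMMAS AND PROOFS =====
theorem pv_contains_false {κ ν : Type} [BEq κ] [LawfulBEq κ] (d : PySem.Dict κ ν) (k : κ)
    (h : d.contains k = false) : ∀ p ∈ d.items, p.1 ≠ k := by
  intro p hp heq
  have hm : k ∈ d.keys := by
    simp only [PySem.Dict.keys]
    exact heq ▸ List.mem_map_of_mem hp
  have := (PySem.Dict.contains_iff_mem_keys d k).2 hm
  simp [this] at h

theorem pv_insert_insert_self {κ ν : Type} [BEq κ] [LawfulBEq κ] (d : PySem.Dict κ ν) (k : κ) (v w : ν) :
    (d.insert k v).insert k w = d.insert k w := by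
  have h2 : (d.insert k v).contains k = true := PySem.Dict.contains_insert_self d k v
  apply PySem.Dict.ext
  by_cases h : d.contains k = true
  · rw [PySem.Dict.items_insert_of_contains _ _ h2,
        PySem.Dict.items_insert_of_contains _ _ h,
        PySem.Dict.items_insert_of_contains _ _ h, List.map_map]
    apply List.map_congr_left
    intro p _
    by_cases hk : p.1 == k <;> simp [hk]
  · have h' : d.contains k = false := by simp [h]
    rw [PySem.Dict.items_insert_of_contains _ _ h2,
        PySem.Dict.items_insert_of_not_contains _ _ h',
        PySem.Dict.items_insert_of_not_contains _ _ h', List.map_append]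
    have hid : d.items.map (fun p => if (p.1 == k) = true then (k, w) else p) = d.items.map id :=
      List.map_congr_left (by
        intro p hp
        have := pv_contains_false d k h' p hp
        simp [this])
    simp [hid]

theorem pv_insert_insert_comm {κ ν : Type} [BEq κ] [LawfulBEq κ] (d : PySem.Dict κ ν) (k k' : κ) (v w : ν)
    (hk : d.contains k = true) (hne : k' ≠ k) :
    (d.insert k v).insert k' w = (d.insert k' w).insert k v := by
  have hki : (d.insert k' w).contains k = true := by
    rw [PySem.Dict.contains_insert]; simp [hk]
  apply PySem.Dict.ext
  by_cases h' : d.contains k' = true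
  · have h'i : (d.insert k v).contains k' = true := by
      rw [PySem.Dict.contains_insert]; simp [h']
    rw [PySem.Dict.items_insert_of_contains _ _ h'i,
        PySem.Dict.items_insert_of_contains _ _ hk,
        PySem.Dict.items_insert_of_contains _ _ hki,
        PySem.Dict.items_insert_of_contains _ _ h', List.map_map, List.map_map]
    apply List.map_congr_left
    intro p _
    by_cases hpk : p.1 = k
    · simp [hpk, hne, Ne.symm hne]
    · by_cases hpk' : p.1 = k' <;> simp [hpk, hpk', hne, Ne.symm hne]
  · have h'f : d.contains k' = false := by simp [h']
    have h'i : (d.insert k v).contains k' = false := by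
      rw [PySem.Dict.contains_insert]
      simp [h'f]
      intro hc
      exact absurd hc hne
    rw [PySem.Dict.items_insert_of_not_contains _ _ h'i,
        PySem.Dict.items_insert_of_contains _ _ hk,
        PySem.Dict.items_insert_of_contains _ _ hki,
        PySem.Dict.items_insert_of_not_contains _ _ h'f, List.map_append]
    have : ((k', w).1 == k) = false := by simp [hne]
    simp [this]

def pvNStep (bc : PySem.Dict String (PySem.Dict String Int)) (q : String × String) :
    PySem.Dict String (PySem.Dict String Int) := pvReshapeStep bc (q, 1)

theorem pv_absorb (bc : PySem.Dict String (PySem.Dict String Int)) (q : String × String) (n : Int) :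
    pvNStep (pvReshapeStep bc (q, n)) q = pvReshapeStep bc (q, n + 1) := by
  unfold pvNStep pvReshapeStep
  simp only [PySem.Dict.getD_insert_self]
  rw [pv_insert_insert_self, pv_insert_insert_self, add_assoc]

def pvHas (bc : PySem.Dict String (PySem.Dict String Int)) (q : String × String) : Prop :=
  bc.contains q.1 = true ∧ (bc.getD q.1 PySem.Dict.empty).contains q.2 = true

theorem pv_has_self (bc : PySem.Dict String (PySem.Dict String Int)) (q : String × String) (n : Int) :
    pvHas (pvReshapeStep bc (q, n)) q := by
  unfold pvHas pvReshapeStep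
  refine ⟨PySem.Dict.contains_insert_self _ _ _, ?_⟩
  rw [PySem.Dict.getD_insert_self]
  exact PySem.Dict.contains_insert_self _ _ _

theorem pv_has_mono (bc : PySem.Dict String (PySem.Dict String Int)) (p q : String × String) (m : Int)
    (h : pvHas bc p) : pvHas (pvReshapeStep bc (q, m)) p := by
  obtain ⟨h1, h2⟩ := h
  unfold pvHas pvReshapeStep
  constructor
  · rw [PySem.Dict.contains_insert]; simp [h1]
  · by_cases hk : p.1 = q.1
    · rw [hk, PySem.Dict.getD_insert_self, PySem.Dict.contains_insert]
      rw [← hk] at *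
      simp [h2]
    · rw [PySem.Dict.getD_insert_of_ne _ _ _ hk]
      exact h2

theorem pv_commute (bc : PySem.Dict String (PySem.Dict String Int)) (p q : String × String) (m : Int)
    (hhas : pvHas bc p) (hne : q ≠ p) :
    pvReshapeStep (pvNStep bc p) (q, m) = pvNStep (pvReshapeStep bc (q, m)) p := by
  obtain ⟨a, b⟩ := p
  obtain ⟨a', b'⟩ := q
  obtain ⟨h1, h2⟩ := hhas
  simp only [pvHas] at h1 h2
  by_cases hk : a' = a
  · subst hk
    have hb : b' ≠ b := by intro h; exact hne (by rw [h])
    unfold pvNStep pvReshapeStep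
    simp only [PySem.Dict.getD_insert_self, pv_insert_insert_self]
    rw [PySem.Dict.getD_insert_of_ne _ _ _ hb, PySem.Dict.getD_insert_of_ne _ _ _ (Ne.symm hb)]
    rw [pv_insert_insert_comm _ _ _ _ _ h2 hb]
  · unfold pvNStep pvReshapeStep
    simp only []
    rw [PySem.Dict.getD_insert_of_ne _ _ _ hk, PySem.Dict.getD_insert_of_ne _ _ _ (Ne.symm hk)]
    exact pv_insert_insert_comm _ _ _ _ _ h1 hk

theorem pv_chain (p : String × String) (suf : List ((String × String) × Int)) :
    ∀ bc : PySem.Dict String (PySem.Dict String Int), pvHas bc p → (∀ it ∈ suf, it.1 ≠ p) →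
    suf.foldl pvReshapeStep (pvNStep bc p) = pvNStep (suf.foldl pvReshapeStep bc) p := by
  induction suf with
  | nil => intro bc _ _; rfl
  | cons it suf ih =>
    intro bc hhas hall
    obtain ⟨q, m⟩ := it
    have hne : q ≠ p := hall (q, m) (List.mem_cons_self)
    simp only [List.foldl_cons]
    rw [pv_commute bc p q m hhas hne]
    exact ih (pvReshapeStep bc (q, m)) (pv_has_mono _ _ _ _ hhas)
      (fun it hit => hall it (List.mem_cons_of_mem _ hit))

theorem pv_step (c : PySem.Dict (String × String) Int) (p : String × String)
    (s : PySem.Dict String (PySem.Dict String Int)) (hnd : c.keys.Nodup) :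
    (pvCountStep c p).items.foldl pvReshapeStep s = pvNStep (c.items.foldl pvReshapeStep s) p := by
  by_cases hc : c.contains p = true
  · have hsome : (c.get? p).isSome := by rw [← PySem.Dict.contains_eq_isSome_get?]; exact hc
    obtain ⟨n, hget⟩ := Option.isSome_iff_exists.1 hsome
    have hgetD : c.getD p 0 = n := by rw [PySem.Dict.getD_eq_get?_getD, hget]; rfl
    obtain ⟨pre, suf, hsplit⟩ := List.append_of_mem (PySem.Dict.mem_items_of_get?_eq_some c hget)
    have hkeys : (pre.map Prod.fst ++ p :: suf.map Prod.fst).Nodup := by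
      have := hnd
      simp only [PySem.Dict.keys, hsplit, List.map_append, List.map_cons] at this
      exact this
    have hdisj := List.disjoint_of_nodup_append hkeys
    have hpre : ∀ it ∈ pre, it.1 ≠ p := by
      intro it hit heq
      exact hdisj (heq ▸ List.mem_map_of_mem hit) List.mem_cons_self
    have hsuf : ∀ it ∈ suf, it.1 ≠ p := by
      intro it hit heq
      have hnc := (List.nodup_cons.mp (hkeys.of_append_right)).1
      exact hnc (heq ▸ List.mem_map_of_mem hit)
    have hitems : (pvCountStep c p).items = pre ++ (p, n + 1) :: suf := by
      unfold pvCountStep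
      rw [PySem.Dict.items_insert_of_contains _ _ hc, hgetD, hsplit, List.map_append, List.map_cons]
      congr 1
      · exact List.map_congr_left (by intro it hit; simp [hpre it hit]) |>.trans (List.map_id _)
      · congr 1
        · simp
        · exact List.map_congr_left (by intro it hit; simp [hsuf it hit]) |>.trans (List.map_id _)
    rw [hitems, hsplit, List.foldl_append, List.foldl_append, List.foldl_cons, List.foldl_cons]
    rw [show (n : Int) + 1 = n + 1 from rfl]
    rw [← pv_absorb (pre.foldl pvReshapeStep s) p n]
    exact pv_chain p suf _ (pv_has_self _ _ _) hsuf
  · have hcf : c.contains p = false := by simp [hc]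
    have hgetD : c.getD p 0 = 0 := PySem.Dict.getD_of_not_contains _ _ hcf
    unfold pvCountStep
    rw [PySem.Dict.items_insert_of_not_contains _ _ hcf, hgetD, List.foldl_append, List.foldl_cons]
    rfl

theorem pv_main (ps : List (String × String)) :
    ∀ (c : PySem.Dict (String × String) Int) (s : PySem.Dict String (PySem.Dict String Int)),
    c.keys.Nodup →
    (ps.foldl pvCountStep c).items.foldl pvReshapeStep s = ps.foldl pvNStep (c.items.foldl pvReshapeStep s) := by
  induction ps with
  | nil => intro c s _; rfl
  | cons p ps ih =>
    intro c s hnd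
    simp only [List.foldl_cons]
    rw [ih (pvCountStep c p) s (PySem.Dict.nodup_keys_insert _ _ _ hnd), pv_step c p s hnd]

theorem pv_windows {alpha : Type} (l : List alpha) :
    (List.range (l.length - 1)).map (fun k => (l.drop k).take 2) = (l.zip l.tail).map (fun p => [p.1, p.2]) := by
  induction l with
  | nil => simp
  | cons x t ih =>
    cases t with
    | nil => simp
    | cons y t' =>
      simp only [List.length_cons, Nat.add_sub_cancel, List.range_succ_eq_map, List.map_cons,
        List.map_map, List.zip_cons_cons, List.tail_cons]
      refine List.cons_eq_cons.mpr ⟨rfl, ?_⟩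
      simp only [List.tail_cons, List.length_cons, Nat.add_sub_cancel] at ih
      rw [← ih]
      exact List.map_congr_left (fun k _ => rfl)

theorem pv_slicesA (l : List String) :
    (PySem.List.pyRange 0 (PySem.List.len l - 2 + 1) 1).map
      (fun i => PySem.List.slice l (some i) (some (i + 2)))
    = (l.zip l.tail).map (fun p => [p.1, p.2]) := by
  rw [← pv_windows]
  rw [show PySem.List.len l - 2 + 1 = (l.length : Int) - 1 by simp [PySem.List.len_eq]; ring]
  rw [PySem.List.pyRange_one, List.map_map]
  have hlen : ((l.length : Int) - 1 - 0).toNat = l.length - 1 := by omega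
  rw [hlen]
  apply List.map_congr_left
  intro k hk
  simp only [Function.comp_apply, zero_add]
  rw [PySem.List.slice_toNat l (by positivity) (by positivity)]
  congr 1 <;> omega

theorem pv_stepA_eq (mcw : List String) (bc : PySem.Dict String (PySem.Dict String Int)) (x y : String) :
    pvStepA mcw bc [x, y] = pvNStep bc (pvMapTok mcw x, pvMapTok mcw y) := by
  have h0 : PySem.List.pyGetD [x, y] 0 "" = x := rfl
  have h1 : PySem.List.pyGetD [x, y] 1 "" = y := rfl
  unfold pvStepA pvNStep pvReshapeStep pvMapTok
  rw [h0, h1]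
  cases hga : bc.get? (if x ∈ mcw then x else "<OOV>") with
  | none =>
    simp only [PySem.Dict.getD_eq_get?_getD, hga, Option.getD_none, PySem.Dict.get?_empty]
    norm_num
  | some inner =>
    cases hgb : inner.get? (if y ∈ mcw then y else "<OOV>") with
    | none => simp [PySem.Dict.getD_eq_get?_getD, hga, hgb]
    | some v => simp [PySem.Dict.getD_eq_get?_getD, hga, hgb]

theorem pv_foldl_flat {alpha beta gamma : Type} (g : gamma → List alpha) (F : beta → alpha → beta) :
    ∀ (cs : List gamma) (init : beta),
    cs.foldl (fun acc c => (g c).foldl F acc) init = (cs.flatMap g).foldl F init := by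
  intro cs
  induction cs with
  | nil => intro init; rfl
  | cons c cs ih => intro init; simp only [List.foldl_cons, List.flatMap_cons, List.foldl_append, ih]

theorem pv_ctxA (mcw : List String) (ctx : List String) (bc : PySem.Dict String (PySem.Dict String Int)) :
    ((PySem.List.pyRange 0 (PySem.List.len ctx - 2 + 1) 1).map
      (fun i => PySem.List.slice ctx (some i) (some (i + 2)))).foldl (pvStepA mcw) bc
    = ((ctx.zip ctx.tail).map (fun p => (pvMapTok mcw p.1, pvMapTok mcw p.2))).foldl pvNStep bc := by
  rw [pv_slicesA, List.foldl_map, List.foldl_map]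
  simp only [pv_stepA_eq]

theorem pv_ctxB (mcw : List String) (ctx : List String) (c : PySem.Dict (String × String) Int) :
    ((ctx.map (pvMapTok mcw)).zip (PySem.List.slice (ctx.map (pvMapTok mcw)) (some 1) none)).foldl pvCountStep c
    = ((ctx.zip ctx.tail).map (fun p => (pvMapTok mcw p.1, pvMapTok mcw p.2))).foldl pvCountStep c := by
  rw [PySem.List.slice_from_one, ← List.map_tail, List.zip_map, List.foldl_map, List.foldl_map]
  apply PySem.List.foldl_congr_mem
  intro acc p _
  cases p
  rfl

theorem pv_dicts (contexts : List (List String)) (mcw : List String)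
    (seed : PySem.Dict String (PySem.Dict String Int)) :
    contexts.foldl (fun bc context =>
      ((PySem.List.pyRange 0 (PySem.List.len context - 2 + 1) 1).map
        (fun i => PySem.List.slice context (some i) (some (i + 2)))).foldl (pvStepA mcw) bc) seed
    = (contexts.foldl (fun c context =>
        ((context.map (pvMapTok mcw)).zip
          (PySem.List.slice (context.map (pvMapTok mcw)) (some 1) none)).foldl pvCountStep c)
        PySem.Dict.empty).items.foldl pvReshapeStep seed := by
  have hA := PySem.List.foldl_congr_mem (l := contexts) (init := seed)
    (f := fun bc context => ((PySem.List.pyRange 0 (PySem.List.len context - 2 + 1) 1).map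
        (fun i => PySem.List.slice context (some i) (some (i + 2)))).foldl (pvStepA mcw) bc)
    (g := fun bc ctx => ((ctx.zip ctx.tail).map (fun p => (pvMapTok mcw p.1, pvMapTok mcw p.2))).foldl pvNStep bc)
    (by intro bc ctx _; exact pv_ctxA mcw ctx bc)
  have hB := PySem.List.foldl_congr_mem (l := contexts) (init := (PySem.Dict.empty : PySem.Dict (String × String) Int))
    (f := fun c context => ((context.map (pvMapTok mcw)).zip
          (PySem.List.slice (context.map (pvMapTok mcw)) (some 1) none)).foldl pvCountStep c)
    (g := fun c ctx => ((ctx.zip ctx.tail).map (fun p => (pvMapTok mcw p.1, pvMapTok mcw p.2))).foldl pvCountStep c)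
    (by intro c ctx _; exact pv_ctxB mcw ctx c)
  have hA' : contexts.foldl (fun bc ctx => ((ctx.zip ctx.tail).map (fun p => (pvMapTok mcw p.1, pvMapTok mcw p.2))).foldl pvNStep bc) seed
      = (contexts.flatMap (fun ctx => (ctx.zip ctx.tail).map (fun p => (pvMapTok mcw p.1, pvMapTok mcw p.2)))).foldl pvNStep seed :=
    pv_foldl_flat _ _ contexts seed
  have hB' : contexts.foldl (fun c ctx => ((ctx.zip ctx.tail).map (fun p => (pvMapTok mcw p.1, pvMapTok mcw p.2))).foldl pvCountStep c) PySem.Dict.empty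
      = (contexts.flatMap (fun ctx => (ctx.zip ctx.tail).map (fun p => (pvMapTok mcw p.1, pvMapTok mcw p.2)))).foldl pvCountStep PySem.Dict.empty :=
    pv_foldl_flat _ _ contexts PySem.Dict.empty
  rw [hA, hB, hA', hB', pv_main _ _ _ PySem.Dict.nodup_keys_empty]
  rfl

-- ===== VERDICT (by name: the statement is the Claim_ definition above) =====
theorem extract_bigram_spec : Claim_equal_extract_bigram := by
  intro contexts mostCommonWords _
  unfold Spec_extract_bigram
  simp only [extract_bigram, extract_bigram_alt]
  rw [pv_dicts contexts mostCommonWords]
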